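-- pv_equiv track=rewrite | github.com/justinshenk/temporal-awareness | scripts/experiments/behavioral_metrics.py | build_repetitive_prompt
-- ===== SOURCE A (Python) =====
-- FILLER_TEMPLATES = [
--     "Continue with the next item. ",
--     "Proceed to the following task. ",
--     "Moving on to another similar request. ",
--     "Here is another one to process. ",
--     "Next task in the sequence. ",
--     "Please handle the following as well. ",
--     "Another item requiring attention. ",
--     "Continuing the sequence of tasks. ",
-- ]
--
-- def build_repetitive_prompt(base_prompt: str, n_reps: int) -> str:
--     """Build prompt with n repetitions of filler prefix (matches patience_degradation.py)."""
--     if n_reps <= 1: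
--         return base_prompt
--
--     prefix_parts = []
--     for i in range(n_reps - 1):
--         filler = FILLER_TEMPLATES[i % len(FILLER_TEMPLATES)]
--         prefix_parts.append(filler)
--
--     return "".join(prefix_parts) + base_prompt
-- ===== SOURCE B (Python) =====
-- FILLER_TEMPLATES = [
--     "Continue with the next item. ",
--     "Proceed to the following task. ",
--     "Moving on to another similar request. ",
--     "Here is another one to process. ",
--     "Next task in the sequence. ",
--     "Please handle the following as well. ",
--     "Another item requiring attention. ",
--     "Continuing the sequence of tasks. ",
-- ]
--
-- def build_repetitive_prompt(base_prompt: str, n_reps: int) -> str: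
--     """Build prompt with n repetitions of filler prefix (matches patience_degradation.py)."""
--     if n_reps <= 1:
--         return base_prompt
--     q, r = divmod(n_reps - 1, len(FILLER_TEMPLATES))
--     block = "".join(FILLER_TEMPLATES)
--     return block * q + "".join(FILLER_TEMPLATES[:r]) + base_prompt
-- ===== Notes on version B (the rewrite author's own statement) =====
-- stated objective: simpler
-- what changed: Replaces the element-by-element modulo loop over range(n_reps-1) with one divmod: the full template block joined once, repeated by string multiplication, plus a remainder slice.
import Mathlib
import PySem

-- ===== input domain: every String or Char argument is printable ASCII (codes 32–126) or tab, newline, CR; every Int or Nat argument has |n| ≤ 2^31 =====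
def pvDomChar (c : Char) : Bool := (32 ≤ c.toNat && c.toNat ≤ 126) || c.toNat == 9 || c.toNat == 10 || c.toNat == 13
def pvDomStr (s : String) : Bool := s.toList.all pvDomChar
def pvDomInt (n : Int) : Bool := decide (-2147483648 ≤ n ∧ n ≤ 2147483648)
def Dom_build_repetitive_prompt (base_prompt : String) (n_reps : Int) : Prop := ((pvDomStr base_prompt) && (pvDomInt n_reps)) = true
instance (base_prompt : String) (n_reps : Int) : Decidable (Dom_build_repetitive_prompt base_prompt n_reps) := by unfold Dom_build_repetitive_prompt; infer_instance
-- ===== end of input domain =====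

-- B replaces A's element-by-element modulo loop with one divmod: the joined template
-- block repeated bulk-wise plus a remainder slice (simpler decomposition, same results).


-- module constant FILLER_TEMPLATES (shared context of A and B)
def fillerTemplates : List String := [
  "Continue with the next item. ",
  "Proceed to the following task. ",
  "Moving on to another similar request. ",
  "Here is another one to process. ",
  "Next task in the sequence. ",
  "Please handle the following as well. ",
  "Another item requiring attention. ",
  "Continuing the sequence of tasks. "]

-- ===== PORT A =====
-- FILLER_TEMPLATES[i % len(FILLER_TEMPLATES)] always has 0 ≤ index < length, so the
-- Python indexing never raises; pyGetD with default "" is exact here.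
def build_repetitive_prompt (base_prompt : String) (n_reps : Int) : String :=
  if n_reps ≤ 1 then base_prompt
  else
    let prefix_parts := (PySem.List.pyRange 0 (n_reps - 1) 1).foldl
      (fun acc i =>
        let filler := PySem.List.pyGetD fillerTemplates (PySem.Int.mod i (Int.ofNat fillerTemplates.length)) ""
        acc ++ [filler]) []
    PySem.Str.join "" prefix_parts ++ base_prompt

-- ===== PORT B =====
-- Python's `s * n` (empty for n ≤ 0): ported by hand, exact.
def pyStrMul (s : String) (n : Int) : String := PySem.Str.join "" (List.replicate n.toNat s)

def build_repetitive_prompt_alt (base_prompt : String) (n_reps : Int) : String :=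
  if n_reps ≤ 1 then base_prompt
  else
    match PySem.Int.divmod? (n_reps - 1) (Int.ofNat fillerTemplates.length) with
    | none => ""   -- unreachable: the divisor is the length 8 ≠ 0
    | some (q, r) =>
      let block := PySem.Str.join "" fillerTemplates
      pyStrMul block q ++ PySem.Str.join "" (PySem.List.slice fillerTemplates none (some r)) ++ base_prompt

-- ===== PRECONDITION & SPEC =====
def Spec_build_repetitive_prompt (base_prompt : String) (n_reps : Int) (out : String) : Prop := out = build_repetitive_prompt_alt base_prompt n_reps
instance (base_prompt : String) (n_reps : Int) (out : String) : Decidable (Spec_build_repetitive_prompt base_prompt n_reps out) := by unfold Spec_build_repetitive_prompt; infer_instance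

-- ===== CLAIM (what is proved, stated in full; the proofs are below) =====
def Claim_equal_build_repetitive_prompt : Prop := ∀ (base_prompt : String) (n_reps : Int), Dom_build_repetitive_prompt base_prompt n_reps → Spec_build_repetitive_prompt base_prompt n_reps (build_repetitive_prompt base_prompt n_reps)

-- ===== LEMMAS AND PROOFS =====

theorem flatten_intersperse_nil {α : Type} (l : List (List α)) :
    (List.intersperse [] l).flatten = l.flatten := by
  induction l with
  | nil => rfl
  | cons h t ih =>
    cases t with
    | nil => rfl
    | cons h2 t2 => simp_all [List.intersperse]

theorem joinE_eq (parts : List String) :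
    PySem.Str.join "" parts = String.ofList (parts.map String.toList).flatten := by
  simp [PySem.Str.join, PySem.Chars.join, List.intercalate, flatten_intersperse_nil]

theorem joinE_cons (a : String) (l : List String) :
    PySem.Str.join "" (a :: l) = a ++ PySem.Str.join "" l := by
  simp [joinE_eq, String.ofList_append]

theorem joinE_append (l1 l2 : List String) :
    PySem.Str.join "" (l1 ++ l2) = PySem.Str.join "" l1 ++ PySem.Str.join "" l2 := by
  simp [joinE_eq, String.ofList_append]

theorem take_eq_map_range (m : Nat) (hm : m < 8) :
    (List.range m).map (fun k => fillerTemplates.getD (k % 8) "") = fillerTemplates.take m := by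
  interval_cases m <;> rfl

theorem key_lemma (m : Nat) :
    PySem.Str.join "" ((List.range m).map (fun k => fillerTemplates.getD (k % 8) "")) =
      PySem.Str.join "" (List.replicate (m / 8) (PySem.Str.join "" fillerTemplates)) ++
        PySem.Str.join "" (fillerTemplates.take (m % 8)) := by
  induction m using Nat.strong_induction_on with
  | _ m ih =>
    by_cases hm : m < 8
    · rw [take_eq_map_range m hm, Nat.div_eq_of_lt hm, Nat.mod_eq_of_lt hm]
      simp [joinE_eq]
    · obtain ⟨k, rfl⟩ : ∃ k, m = 8 + k := ⟨m - 8, by omega⟩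
      have h1 : (8 + k) / 8 = k / 8 + 1 := by omega
      have h2 : (8 + k) % 8 = k % 8 := by omega
      rw [List.range_add, List.map_append, List.map_map, joinE_append, h1, h2]
      have h3 : ((List.range k).map ((fun k => fillerTemplates.getD (k % 8) "") ∘ fun x => 8 + x))
          = (List.range k).map (fun k => fillerTemplates.getD (k % 8) "") := by
        apply List.map_congr_left
        intro x _
        simp [Function.comp, Nat.add_mod_left]
      have h4 : (List.range 8).map (fun k => fillerTemplates.getD (k % 8) "") = fillerTemplates := rfl
      rw [h3, h4, ih k (by omega), List.replicate_succ, joinE_cons, String.append_assoc]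

-- ===== VERDICT (by name: the statement is the Claim_ definition above) =====
theorem build_repetitive_prompt_spec : Claim_equal_build_repetitive_prompt := by
  intro base_prompt n_reps _
  unfold Spec_build_repetitive_prompt build_repetitive_prompt build_repetitive_prompt_alt
  by_cases h : n_reps ≤ 1
  · simp [h]
  · simp only [h, if_false]
    set m : Nat := (n_reps - 1).toNat with hmdef
    have hm : n_reps - 1 = (m : Int) := (Int.toNat_of_nonneg (by omega)).symm
    have hlen : (Int.ofNat fillerTemplates.length) = ((8 : Nat) : Int) := rfl
    -- A side: the loop is a map over range m
    rw [PySem.List.foldl_append_singleton_eq_map]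
    have hA : (PySem.List.pyRange 0 (n_reps - 1) 1).map
        (fun i => PySem.List.pyGetD fillerTemplates (PySem.Int.mod i (Int.ofNat fillerTemplates.length)) "")
        = (List.range m).map (fun k => fillerTemplates.getD (k % 8) "") := by
      rw [hm, hlen, PySem.List.pyRange_one, List.map_map]
      apply List.map_congr_left
      intro k _
      simp only [Function.comp, zero_add, PySem.Int.mod_natCast, PySem.List.pyGetD_natCast,
        List.getD]
    rw [hA]
    -- B side: divmod unfolds to (m/8, m%8)
    have hdm : PySem.Int.divmod? (n_reps - 1) (Int.ofNat fillerTemplates.length)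
        = some (((m / 8 : Nat) : Int), ((m % 8 : Nat) : Int)) := by
      rw [hm, hlen]
      simp [PySem.Int.divmod?, Int.fdiv_eq_ediv, Int.fmod_eq_emod]
    rw [hdm]
    simp only [pyStrMul, PySem.List.slice_to_natCast, Int.toNat_natCast]
    rw [List.nil_append, key_lemma m, String.append_assoc]
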